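-- pv_equiv track=rewrite | github.com/signalnine/tildebin | boxctl/scripts/k8s/extended_resources_audit.py | is_extended_resource
-- ===== SOURCE A (Python) =====
-- EXTENDED_RESOURCE_PREFIXES = [
--     'nvidia.com/',
--     'amd.com/',
--     'intel.com/',
--     'habana.ai/',
--     'xilinx.com/',
--     'smarter-devices/',
--     'devices.kubevirt.io/',
--     'gpu.intel.com/',
--     'fpga.intel.com/',
--     'qat.intel.com/',
--     'sriov.openshift.io/',
--     'openshift.io/',
--     'k8s.io/',
--     'rdma/',
--     'hugepages-',
-- ]
--
-- STANDARD_RESOURCES = {'cpu', 'memory', 'ephemeral-storage', 'pods'}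
--
-- def is_extended_resource(resource_name: str) -> bool:
--     """Check if a resource name is an extended resource."""
--     if resource_name in STANDARD_RESOURCES:
--         return False
--     for prefix in EXTENDED_RESOURCE_PREFIXES:
--         if resource_name.startswith(prefix):
--             return True
--     if '/' in resource_name:
--         return True
--     if resource_name.startswith('hugepages-'):
--         return True
--     return False
-- ===== SOURCE B (Python) =====
-- def is_extended_resource(resource_name: str) -> bool:
--     """Check if a resource name is an extended resource."""
--     return '/' in resource_name or resource_name.startswith('hugepages-')
-- ===== Notes on version B (the rewrite author's own statement) =====
-- stated objective: simpler
-- what changed: Replaced the standard-resource set lookup and the linear scan over the 15-prefix list with two direct structural checks ('/' in name, or a 'hugepages-' prefix), proved to give the same answer since every prefix except 'hugepages-' contains '/' and no standard resource contains '/' or starts with 'hugepages-'.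
import Mathlib
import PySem

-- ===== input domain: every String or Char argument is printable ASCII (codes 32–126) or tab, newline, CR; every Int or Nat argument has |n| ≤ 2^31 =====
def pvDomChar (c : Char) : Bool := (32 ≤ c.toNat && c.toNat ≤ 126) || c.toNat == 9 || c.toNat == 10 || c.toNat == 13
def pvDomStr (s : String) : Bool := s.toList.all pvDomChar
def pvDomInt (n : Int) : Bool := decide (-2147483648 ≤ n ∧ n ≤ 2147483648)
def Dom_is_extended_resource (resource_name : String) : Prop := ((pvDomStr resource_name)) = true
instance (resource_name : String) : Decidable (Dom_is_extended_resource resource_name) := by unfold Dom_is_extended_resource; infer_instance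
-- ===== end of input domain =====

-- B replaces the set lookup and the 15-prefix scan with two direct checks ('/' in name or a
-- 'hugepages-' prefix), which provably give the same answer (objective: simpler).

-- ===== PORT A =====
def EXTENDED_RESOURCE_PREFIXES : List String :=
  ["nvidia.com/", "amd.com/", "intel.com/", "habana.ai/", "xilinx.com/",
   "smarter-devices/", "devices.kubevirt.io/", "gpu.intel.com/", "fpga.intel.com/",
   "qat.intel.com/", "sriov.openshift.io/", "openshift.io/", "k8s.io/", "rdma/",
   "hugepages-"]

def STANDARD_RESOURCES : PySem.Set String :=
  PySem.Set.ofList ["cpu", "memory", "ephemeral-storage", "pods"]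

def is_extended_resource (resource_name : String) : Bool :=
  if PySem.Set.contains STANDARD_RESOURCES resource_name then false
  else if EXTENDED_RESOURCE_PREFIXES.any (fun prefix_ => PySem.Str.startswith resource_name prefix_) then true
  else if PySem.Str.isIn "/" resource_name then true
  else if PySem.Str.startswith resource_name "hugepages-" then true
  else false

-- ===== PORT B =====
def is_extended_resource_alt (resource_name : String) : Bool :=
  PySem.Str.isIn "/" resource_name || PySem.Str.startswith resource_name "hugepages-"

-- ===== PRECONDITION & SPEC =====
def Spec_is_extended_resource (resource_name : String) (out : Bool) : Prop := out = is_extended_resource_alt resource_name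
instance (resource_name : String) (out : Bool) : Decidable (Spec_is_extended_resource resource_name out) := by unfold Spec_is_extended_resource; infer_instance

-- ===== CLAIM (what is proved, stated in full; the proofs are below) =====
def Claim_equal_is_extended_resource : Prop := ∀ (resource_name : String), Dom_is_extended_resource resource_name → Spec_is_extended_resource resource_name (is_extended_resource resource_name)

-- ===== LEMMAS AND PROOFS =====

-- A slash-containing prefix of s puts '/' inside s.
lemma slash_isIn_of_prefix (s p : String) (hp : ('/' : Char) ∈ p.toList)
    (h : PySem.Str.startswith s p = true) : PySem.Str.isIn "/" s = true := by
  rw [PySem.Str.startswith_eq, PySem.Chars.startswith_iff] at h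
  rw [PySem.Str.isIn_eq, PySem.Chars.isIn_iff_infix]
  obtain ⟨l, r, hl⟩ := List.append_of_mem hp
  have hinf : ['/'] <:+: p.toList := ⟨l, r, by simp [hl]⟩
  exact hinf.trans h.isInfix

-- If A's prefix loop fires, B returns true.
lemma alt_true_of_any_prefix (s : String)
    (h : EXTENDED_RESOURCE_PREFIXES.any (fun prefix_ => PySem.Str.startswith s prefix_) = true) :
    is_extended_resource_alt s = true := by
  unfold is_extended_resource_alt
  simp only [EXTENDED_RESOURCE_PREFIXES, List.any_cons, List.any_nil, Bool.or_eq_true,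
    Bool.or_false] at h
  rcases h with h|h|h|h|h|h|h|h|h|h|h|h|h|h|h
  · exact Bool.or_eq_true_iff.mpr (Or.inl (slash_isIn_of_prefix s _ (by decide) h))
  · exact Bool.or_eq_true_iff.mpr (Or.inl (slash_isIn_of_prefix s _ (by decide) h))
  · exact Bool.or_eq_true_iff.mpr (Or.inl (slash_isIn_of_prefix s _ (by decide) h))
  · exact Bool.or_eq_true_iff.mpr (Or.inl (slash_isIn_of_prefix s _ (by decide) h))
  · exact Bool.or_eq_true_iff.mpr (Or.inl (slash_isIn_of_prefix s _ (by decide) h))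
  · exact Bool.or_eq_true_iff.mpr (Or.inl (slash_isIn_of_prefix s _ (by decide) h))
  · exact Bool.or_eq_true_iff.mpr (Or.inl (slash_isIn_of_prefix s _ (by decide) h))
  · exact Bool.or_eq_true_iff.mpr (Or.inl (slash_isIn_of_prefix s _ (by decide) h))
  · exact Bool.or_eq_true_iff.mpr (Or.inl (slash_isIn_of_prefix s _ (by decide) h))
  · exact Bool.or_eq_true_iff.mpr (Or.inl (slash_isIn_of_prefix s _ (by decide) h))
  · exact Bool.or_eq_true_iff.mpr (Or.inl (slash_isIn_of_prefix s _ (by decide) h))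
  · exact Bool.or_eq_true_iff.mpr (Or.inl (slash_isIn_of_prefix s _ (by decide) h))
  · exact Bool.or_eq_true_iff.mpr (Or.inl (slash_isIn_of_prefix s _ (by decide) h))
  · exact Bool.or_eq_true_iff.mpr (Or.inl (slash_isIn_of_prefix s _ (by decide) h))
  · exact Bool.or_eq_true_iff.mpr (Or.inr h)

-- A standard resource name is none of the four literals with a slash or a 'hugepages-' prefix.
lemma alt_false_of_standard (s : String)
    (h : PySem.Set.contains STANDARD_RESOURCES s = true) :
    is_extended_resource_alt s = false := by
  have : s = "cpu" ∨ s = "memory" ∨ s = "ephemeral-storage" ∨ s = "pods" := by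
    simpa [STANDARD_RESOURCES, PySem.Set.contains, PySem.Set.ofList] using h
  rcases this with rfl|rfl|rfl|rfl <;> decide

-- ===== VERDICT (by name: the statement is the Claim_ definition above) =====
theorem is_extended_resource_spec : Claim_equal_is_extended_resource := by
  intro s _
  unfold Spec_is_extended_resource is_extended_resource
  by_cases h1 : PySem.Set.contains STANDARD_RESOURCES s = true
  · rw [if_pos h1, alt_false_of_standard s h1]
  · rw [if_neg h1]
    by_cases h2 : EXTENDED_RESOURCE_PREFIXES.any (fun prefix_ => PySem.Str.startswith s prefix_) = true
    · rw [if_pos h2, alt_true_of_any_prefix s h2]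
    · rw [if_neg h2]
      by_cases h3 : PySem.Str.isIn "/" s = true
      · rw [if_pos h3]
        unfold is_extended_resource_alt
        rw [h3, Bool.true_or]
      · rw [if_neg h3]
        unfold is_extended_resource_alt
        rw [Bool.not_eq_true] at h3
        rw [h3, Bool.false_or]
        by_cases h4 : PySem.Str.startswith s "hugepages-" = true
        · rw [if_pos h4, h4]
        · rw [if_neg h4]
          rw [Bool.not_eq_true] at h4
          rw [h4]
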